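-- pv_equiv track=rewrite | github.com/HAE-RAE/logical-puzzles | evaluation/run.py | filter_puzzles
-- ===== SOURCE A (Python) =====
-- from typing import List, Dict, Optional, Tuple
--
-- def filter_puzzles(
--     puzzles: List[Dict],
--     difficulty: Optional[str] = None,
--     limit: Optional[int] = None
-- ) -> List[Dict]:
--     filtered = puzzles
--
--     if difficulty:
--         difficulty_lower = difficulty.lower()
--         filtered = [
--             p for p in filtered
--             if p.get("difficulty", "").lower() == difficulty_lower
--         ]
--
--     if limit is not None and limit > 0:
--         filtered = filtered[:limit]
--
--     return filtered
-- ===== SOURCE B (Python) =====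
-- def filter_puzzles(puzzles, difficulty=None, limit=None):
--     # Divide and conquer: split the list in halves, solve each half with a
--     # remaining-budget counter, and concatenate.  No slicing of the result,
--     # no linear scan with a break; recursion depth is O(log n).
--     want = difficulty.lower() if difficulty else None
--
--     def keep(p):
--         return want is None or p.get("difficulty", "").lower() == want
--
--     cap = limit if (limit is not None and limit > 0) else None
--
--     def go(ps, k):
--         # up to k kept elements of ps (k is None for "no bound")
--         if k == 0 or not ps:
--             return []
--         if len(ps) == 1:
--             return [ps[0]] if keep(ps[0]) else []
--         mid = len(ps) // 2
--         left = go(ps[:mid], k)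
--         right = go(ps[mid:], None if k is None else k - len(left))
--         return left + right
--
--     return go(puzzles, cap)
-- ===== Notes on version B (the rewrite author's own statement) =====
-- stated objective: alternative
-- what changed: Replaces the two-phase comprehension-filter followed by a slice with a divide-and-conquer recursion that splits the list in halves and threads a remaining-budget counter through the two subproblems, concatenating their results.
import Mathlib
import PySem

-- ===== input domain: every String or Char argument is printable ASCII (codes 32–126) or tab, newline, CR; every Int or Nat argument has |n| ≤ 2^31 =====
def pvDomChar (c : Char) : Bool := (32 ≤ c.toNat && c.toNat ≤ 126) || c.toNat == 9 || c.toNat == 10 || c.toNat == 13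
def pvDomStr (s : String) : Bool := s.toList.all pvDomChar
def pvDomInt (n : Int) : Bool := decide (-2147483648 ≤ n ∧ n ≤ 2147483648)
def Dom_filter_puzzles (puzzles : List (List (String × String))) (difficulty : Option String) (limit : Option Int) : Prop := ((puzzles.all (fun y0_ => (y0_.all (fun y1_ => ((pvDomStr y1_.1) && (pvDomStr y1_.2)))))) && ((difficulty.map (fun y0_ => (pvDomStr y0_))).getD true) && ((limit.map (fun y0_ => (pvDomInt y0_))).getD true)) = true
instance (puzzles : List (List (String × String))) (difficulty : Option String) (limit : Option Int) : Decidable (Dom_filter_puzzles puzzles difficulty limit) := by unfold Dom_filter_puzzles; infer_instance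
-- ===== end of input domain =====

-- B replaces A's filter-then-slice with a budget-threading divide-and-conquer over list halves (alternative decomposition).
-- Equivalence is about the RETURN value: when no filter/limit applies Python A returns the very same list object, B a fresh equal list.

-- ===== PORT A =====
def filter_puzzles (puzzles : List (List (String × String))) (difficulty : Option String) (limit : Option Int) : List (List (String × String)) :=
  let filtered := puzzles
  let filtered :=
    match difficulty with
    | some d =>
        if d ≠ "" then
          let difficulty_lower := PySem.Str.lower d
          filtered.filter (fun p =>
            decide (PySem.Str.lower (PySem.Dict.getD (PySem.Dict.mk p) "difficulty" "") = difficulty_lower))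
        else filtered
    | none => filtered
  match limit with
  | some l => if l > 0 then PySem.List.slice filtered none (some l) else filtered
  | none => filtered

-- ===== PORT B =====
-- B's keep predicate: 'want is None or p.get("difficulty","").lower() == want'
def fpKeep (want : Option String) (p : List (String × String)) : Bool :=
  match want with
  | none => true
  | some w => decide (PySem.Str.lower (PySem.Dict.getD (PySem.Dict.mk p) "difficulty" "") = w)

-- B's 'go(ps, k)': divide and conquer with remaining budget k (none = unbounded).
-- 'len(ps) // 2' on a nonnegative Python int is exactly Nat division here.
def fpGo (want : Option String) (k : Option Int) (ps : List (List (String × String))) :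
    List (List (String × String)) :=
  if k = some 0 ∨ ps = [] then []
  else if ps.length = 1 then
    match ps with
    | p :: _ => if fpKeep want p then [p] else []
    | [] => []
  else
    let mid := ps.length / 2
    let left := fpGo want k (ps.take mid)
    let right := fpGo want (match k with | none => none | some m => some (m - left.length)) (ps.drop mid)
    left ++ right
termination_by ps.length
decreasing_by
  all_goals {
    have h0 : ps.length ≠ 0 := by
      have h : ¬ps = [] := fun he => ‹¬(k = some 0 ∨ ps = [])› (Or.inr he)
      simpa using h
    have h1 : ps.length ≠ 1 := ‹¬ps.length = 1›
    simp only [List.length_take, List.length_drop]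
    omega }

def filter_puzzles_alt (puzzles : List (List (String × String))) (difficulty : Option String) (limit : Option Int) : List (List (String × String)) :=
  let want :=
    match difficulty with
    | some d => if d ≠ "" then some (PySem.Str.lower d) else none
    | none => none
  let cap :=
    match limit with
    | some l => if l > 0 then some l else none
    | none => none
  fpGo want cap puzzles

-- ===== PRECONDITION & SPEC =====
def Spec_filter_puzzles (puzzles : List (List (String × String))) (difficulty : Option String) (limit : Option Int) (out : List (List (String × String))) : Prop := out = filter_puzzles_alt puzzles difficulty limit
instance (puzzles : List (List (String × String))) (difficulty : Option String) (limit : Option Int) (out : List (List (String × String))) : Decidable (Spec_filter_puzzles puzzles difficulty limit out) := by unfold Spec_filter_puzzles; infer_instance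

-- ===== CLAIM (what is proved, stated in full; the proofs are below) =====
def Claim_equal_filter_puzzles : Prop := ∀ (puzzles : List (List (String × String))) (difficulty : Option String) (limit : Option Int), Dom_filter_puzzles puzzles difficulty limit → Spec_filter_puzzles puzzles difficulty limit (filter_puzzles puzzles difficulty limit)

-- ===== LEMMAS AND PROOFS =====

theorem fpKeep_none_filter (xs : List (List (String × String))) :
    xs.filter (fpKeep none) = xs :=
  List.filter_eq_self.mpr (fun _ _ => rfl)

theorem fpGo_nil (want : Option String) (k : Option Int) : fpGo want k [] = [] := by
  rw [fpGo.eq_def]; simp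

theorem fpGo_zero (want : Option String) (ps : List (List (String × String))) :
    fpGo want (some 0) ps = [] := by
  rw [fpGo.eq_def]; simp

theorem fpGo_one (want : Option String) (k : Option Int) (p : List (String × String))
    (hk : k ≠ some 0) : fpGo want k [p] = if fpKeep want p then [p] else [] := by
  rw [fpGo.eq_def]
  rw [if_neg (by simp [hk]), if_pos (by simp)]

theorem fpGo_cons2 (want : Option String) (k : Option Int) (p q : List (String × String))
    (rest : List (List (String × String))) (hk : k ≠ some 0) :
    fpGo want k (p :: q :: rest) =
      fpGo want k ((p :: q :: rest).take ((p :: q :: rest).length / 2)) ++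
      fpGo want
        (match k with
         | none => none
         | some m => some (m - (fpGo want k ((p :: q :: rest).take ((p :: q :: rest).length / 2))).length))
        ((p :: q :: rest).drop ((p :: q :: rest).length / 2)) := by
  rw [fpGo.eq_def]
  rw [if_neg (by simp [hk]), if_neg (by simp)]
  cases k <;> rfl

theorem take_append_budget {α : Type} (xs ys : List α) (n : Nat) :
    List.take n xs ++ List.take (n - (List.take n xs).length) ys = List.take n (xs ++ ys) := by
  rw [List.take_append, List.length_take]
  congr 2
  omega

theorem fpGo_none (want : Option String) (ps : List (List (String × String))) :
    fpGo want none ps = ps.filter (fpKeep want) := by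
  induction hn : ps.length using Nat.strong_induction_on generalizing ps with
  | _ n ih =>
    subst hn
    match ps with
    | [] => simp [fpGo_nil]
    | [p] => rw [fpGo_one want none p (by simp)]; simp [List.filter_cons]
    | p :: q :: rest =>
      rw [fpGo_cons2 want none p q rest (by simp)]
      rw [ih _ (by simp [List.length_take]; omega) _ rfl,
          ih _ (by simp [List.length_drop]; omega) _ rfl,
          ← List.filter_append, List.take_append_drop]

theorem fpGo_some (want : Option String) (ps : List (List (String × String))) :
    ∀ (m : Int), 0 ≤ m → fpGo want (some m) ps = (ps.filter (fpKeep want)).take m.toNat := by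
  induction hn : ps.length using Nat.strong_induction_on generalizing ps with
  | _ n ih =>
    subst hn
    intro m hm
    by_cases hm0 : m = 0
    · simp [hm0, fpGo_zero]
    · have hksome : (some m : Option Int) ≠ some 0 := by simp [hm0]
      match ps with
      | [] => simp [fpGo_nil]
      | [p] =>
        rw [fpGo_one want (some m) p hksome]
        have h1 : m.toNat = (m.toNat - 1) + 1 := by omega
        rw [h1]
        cases h : fpKeep want p <;> simp [h, List.take_succ_cons]
      | p :: q :: rest =>
        rw [fpGo_cons2 want (some m) p q rest hksome]
        rw [ih _ (by simp [List.length_take]; omega) _ rfl m hm]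
        set fl := ((p :: q :: rest).take ((p :: q :: rest).length / 2)).filter (fpKeep want) with hfl
        have hlen : (fl.take m.toNat).length ≤ m.toNat := by
          simp [List.length_take]
        rw [ih _ (by simp [List.length_drop]; omega) _ rfl
          (m - (fl.take m.toNat).length) (by omega)]
        rw [(by omega : (m - ((fl.take m.toNat).length : Int)).toNat = m.toNat - (fl.take m.toNat).length),
          take_append_budget, ← List.filter_append, List.take_append_drop]

-- ===== VERDICT (by name: the statement is the Claim_ definition above) =====
theorem filter_puzzles_spec : Claim_equal_filter_puzzles := by
  intro puzzles difficulty limit hdom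
  clear hdom
  unfold Spec_filter_puzzles filter_puzzles filter_puzzles_alt
  have hslice : ∀ (xs : List (List (String × String))) (l : Int), 0 < l →
      PySem.List.slice xs none (some l) = xs.take l.toNat := by
    intro xs l hl
    rw [PySem.List.slice_to xs (le_of_lt hl)]
  have H : ∀ w,
      (match limit with
       | some l => if l > 0 then PySem.List.slice (puzzles.filter (fpKeep w)) none (some l)
                   else puzzles.filter (fpKeep w)
       | none => puzzles.filter (fpKeep w)) =
      fpGo w (match limit with | some l => if l > 0 then some l else none | none => none) puzzles := by
    intro w
    cases limit with
    | none => simp [fpGo_none]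
    | some l =>
      by_cases hl : 0 < l
      · simp [hl, hslice _ l hl, fpGo_some w puzzles l (le_of_lt hl)]
      · simp [hl, fpGo_none]
  cases difficulty with
  | none =>
    have := H none
    simp only [fpKeep_none_filter] at this
    simpa using this
  | some d =>
    by_cases hd : d = ""
    · have := H none
      simp only [fpKeep_none_filter] at this
      simpa [hd] using this
    · have := H (some (PySem.Str.lower d))
      simpa [hd, fpKeep] using this
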